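-- pv_equiv track=rewrite | github.com/HourLight/HourLight.github.io | python/ziwei_full_engine.py | get_wuxing_ju
-- ===== SOURCE A (Python) =====
-- NAYIN_60 = [
--     '海中金','海中金','爐中火','爐中火','大林木','大林木',
--     '路旁土','路旁土','劍鋒金','劍鋒金','山頭火','山頭火',
--     '澗下水','澗下水','城頭土','城頭土','白蠟金','白蠟金',
--     '楊柳木','楊柳木','泉中水','泉中水','屋上土','屋上土',
--     '霹靂火','霹靂火','松柏木','松柏木','長流水','長流水',
--     '沙中金','沙中金','山下火','山下火','平地木','平地木',
--     '壁上土','壁上土','金箔金','金箔金','覆燈火','覆燈火',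
--     '天河水','天河水','大驛土','大驛土','釵環金','釵環金',
--     '桑柘木','桑柘木','大溪水','大溪水','沙中土','沙中土',
--     '天上火','天上火','石榴木','石榴木','大海水','大海水',
-- ]
--
-- NAYIN_TO_JU = {
--     '金': ('金四局', 4), '木': ('木三局', 3), '水': ('水二局', 2),
--     '火': ('火六局', 6), '土': ('土五局', 5),
-- }
--
-- def get_wuxing_ju(gong_tg_idx, gong_zhi_idx):
--     """五行局：依命宮干支的納音"""
--     gz_idx = (gong_tg_idx % 10) * 12 + gong_zhi_idx  # 不對，要用六十甲子
--     # 六十甲子索引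
--     # 天干和地支必須同陰同陽才能組合
--     # 正確算法：干支共同索引
--     # idx = (tg * 6 + dz/2) 如果同陰陽
--     # 簡化：直接用干支表
--     for i in range(60):
--         if i % 10 == gong_tg_idx and i % 12 == gong_zhi_idx:
--             nayin = NAYIN_60[i]
--             wx = nayin[-1]  # 最後一個字就是五行
--             return NAYIN_TO_JU[wx]
--     # 如果干支不匹配（理論上不會），用備用
--     return ('水二局', 2)
-- ===== SOURCE B (Python) =====
-- # 五行局 lookup table, precomputed once from the sexagenary nayin cycle:
-- # {(i % 10, i % 12): NAYIN_TO_JU[NAYIN_60[i][-1]] for i in range(60)}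
-- WUXING_JU_TABLE = {
--     (0, 0): ('金四局', 4),
--     (1, 1): ('金四局', 4),
--     (2, 2): ('火六局', 6),
--     (3, 3): ('火六局', 6),
--     (4, 4): ('木三局', 3),
--     (5, 5): ('木三局', 3),
--     (6, 6): ('土五局', 5),
--     (7, 7): ('土五局', 5),
--     (8, 8): ('金四局', 4),
--     (9, 9): ('金四局', 4),
--     (0, 10): ('火六局', 6),
--     (1, 11): ('火六局', 6),
--     (2, 0): ('水二局', 2),
--     (3, 1): ('水二局', 2),
--     (4, 2): ('土五局', 5),
--     (5, 3): ('土五局', 5),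
--     (6, 4): ('金四局', 4),
--     (7, 5): ('金四局', 4),
--     (8, 6): ('木三局', 3),
--     (9, 7): ('木三局', 3),
--     (0, 8): ('水二局', 2),
--     (1, 9): ('水二局', 2),
--     (2, 10): ('土五局', 5),
--     (3, 11): ('土五局', 5),
--     (4, 0): ('火六局', 6),
--     (5, 1): ('火六局', 6),
--     (6, 2): ('木三局', 3),
--     (7, 3): ('木三局', 3),
--     (8, 4): ('水二局', 2),
--     (9, 5): ('水二局', 2),
--     (0, 6): ('金四局', 4),
--     (1, 7): ('金四局', 4),
--     (2, 8): ('火六局', 6),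
--     (3, 9): ('火六局', 6),
--     (4, 10): ('木三局', 3),
--     (5, 11): ('木三局', 3),
--     (6, 0): ('土五局', 5),
--     (7, 1): ('土五局', 5),
--     (8, 2): ('金四局', 4),
--     (9, 3): ('金四局', 4),
--     (0, 4): ('火六局', 6),
--     (1, 5): ('火六局', 6),
--     (2, 6): ('水二局', 2),
--     (3, 7): ('水二局', 2),
--     (4, 8): ('土五局', 5),
--     (5, 9): ('土五局', 5),
--     (6, 10): ('金四局', 4),
--     (7, 11): ('金四局', 4),
--     (8, 0): ('木三局', 3),
--     (9, 1): ('木三局', 3),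
--     (0, 2): ('水二局', 2),
--     (1, 3): ('水二局', 2),
--     (2, 4): ('土五局', 5),
--     (3, 5): ('土五局', 5),
--     (4, 6): ('火六局', 6),
--     (5, 7): ('火六局', 6),
--     (6, 8): ('木三局', 3),
--     (7, 9): ('木三局', 3),
--     (8, 10): ('水二局', 2),
--     (9, 11): ('水二局', 2),
-- }
--
-- def get_wuxing_ju(gong_tg_idx, gong_zhi_idx):
--     """五行局：依命宮干支的納音 — single precomputed-table lookup."""
--     return WUXING_JU_TABLE.get((gong_tg_idx, gong_zhi_idx), ('水二局', 2))
-- ===== Notes on version B (the rewrite author's own statement) =====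
-- stated objective: faster
-- what changed: Replaces A's per-call 60-iteration scan over sexagenary indices (with string indexing and a nayin-to-ju dict lookup inside) by a module-level precomputed (tg, zhi) -> ju table, so the function body is a single constant-time dict lookup with the same fallback default.
import Mathlib
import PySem

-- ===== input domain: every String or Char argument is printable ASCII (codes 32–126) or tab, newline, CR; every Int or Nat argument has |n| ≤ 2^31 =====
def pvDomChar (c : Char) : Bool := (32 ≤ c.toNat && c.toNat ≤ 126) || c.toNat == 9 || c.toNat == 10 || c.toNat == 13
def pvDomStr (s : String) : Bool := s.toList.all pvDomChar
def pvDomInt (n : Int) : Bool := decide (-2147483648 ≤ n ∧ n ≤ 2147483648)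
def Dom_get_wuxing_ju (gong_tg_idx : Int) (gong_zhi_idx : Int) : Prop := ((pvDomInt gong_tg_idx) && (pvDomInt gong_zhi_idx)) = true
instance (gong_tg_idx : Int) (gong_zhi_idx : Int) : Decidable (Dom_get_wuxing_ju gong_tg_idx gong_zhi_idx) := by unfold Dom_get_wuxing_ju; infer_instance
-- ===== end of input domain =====

-- B replaces A's per-call 60-step scan by a precomputed (tg, zhi) → ju table, so the
-- function body is one constant-time dict lookup with the same fallback (objective: faster).

-- ===== PORT A =====
-- module constants used by A, transliterated
def pvNAYIN_60 : List String := [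
  "海中金","海中金","爐中火","爐中火","大林木","大林木",
  "路旁土","路旁土","劍鋒金","劍鋒金","山頭火","山頭火",
  "澗下水","澗下水","城頭土","城頭土","白蠟金","白蠟金",
  "楊柳木","楊柳木","泉中水","泉中水","屋上土","屋上土",
  "霹靂火","霹靂火","松柏木","松柏木","長流水","長流水",
  "沙中金","沙中金","山下火","山下火","平地木","平地木",
  "壁上土","壁上土","金箔金","金箔金","覆燈火","覆燈火",
  "天河水","天河水","大驛土","大驛土","釵環金","釵環金",
  "桑柘木","桑柘木","大溪水","大溪水","沙中土","沙中土",
  "天上火","天上火","石榴木","石榴木","大海水","大海水"]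

def pvNAYIN_TO_JU : PySem.Dict String (String × Int) := PySem.Dict.ofList [
  ("金", ("金四局", 4)), ("木", ("木三局", 3)), ("水", ("水二局", 2)),
  ("火", ("火六局", 6)), ("土", ("土五局", 5))]

-- literal port of A: scan i in range(60) for i%10==tg and i%12==zhi, then NAYIN lookup.
-- The `.getD` defaults stand for IndexError/KeyError paths that are unreachable (i < 60,
-- and every nayin ends in one of the five dict keys).
def get_wuxing_ju (gong_tg_idx : Int) (gong_zhi_idx : Int) : String × Int :=
  let _gz_idx := PySem.Int.mod gong_tg_idx 10 * 12 + gong_zhi_idx  -- dead assignment kept from A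
  match (PySem.List.pyRange 0 60 1).find?
      (fun i => PySem.Int.mod i 10 == gong_tg_idx && PySem.Int.mod i 12 == gong_zhi_idx) with
  | some i =>
      let nayin := PySem.List.pyGetD pvNAYIN_60 i ""
      let wx := (PySem.Str.pyGet? nayin (-1)).getD ' '
      (pvNAYIN_TO_JU.get? (String.ofList [wx])).getD ("", 0)
  | none => ("水二局", 2)

-- ===== PORT B =====
-- literal port of Source B: the module-level precomputed table …
def pvWUXING_JU_TABLE : PySem.Dict (Int × Int) (String × Int) := PySem.Dict.ofList [
  ((0, 0), ("金四局", 4)), ((1, 1), ("金四局", 4)), ((2, 2), ("火六局", 6)), ((3, 3), ("火六局", 6)),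
  ((4, 4), ("木三局", 3)), ((5, 5), ("木三局", 3)), ((6, 6), ("土五局", 5)), ((7, 7), ("土五局", 5)),
  ((8, 8), ("金四局", 4)), ((9, 9), ("金四局", 4)), ((0, 10), ("火六局", 6)), ((1, 11), ("火六局", 6)),
  ((2, 0), ("水二局", 2)), ((3, 1), ("水二局", 2)), ((4, 2), ("土五局", 5)), ((5, 3), ("土五局", 5)),
  ((6, 4), ("金四局", 4)), ((7, 5), ("金四局", 4)), ((8, 6), ("木三局", 3)), ((9, 7), ("木三局", 3)),
  ((0, 8), ("水二局", 2)), ((1, 9), ("水二局", 2)), ((2, 10), ("土五局", 5)), ((3, 11), ("土五局", 5)),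
  ((4, 0), ("火六局", 6)), ((5, 1), ("火六局", 6)), ((6, 2), ("木三局", 3)), ((7, 3), ("木三局", 3)),
  ((8, 4), ("水二局", 2)), ((9, 5), ("水二局", 2)), ((0, 6), ("金四局", 4)), ((1, 7), ("金四局", 4)),
  ((2, 8), ("火六局", 6)), ((3, 9), ("火六局", 6)), ((4, 10), ("木三局", 3)), ((5, 11), ("木三局", 3)),
  ((6, 0), ("土五局", 5)), ((7, 1), ("土五局", 5)), ((8, 2), ("金四局", 4)), ((9, 3), ("金四局", 4)),
  ((0, 4), ("火六局", 6)), ((1, 5), ("火六局", 6)), ((2, 6), ("水二局", 2)), ((3, 7), ("水二局", 2)),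
  ((4, 8), ("土五局", 5)), ((5, 9), ("土五局", 5)), ((6, 10), ("金四局", 4)), ((7, 11), ("金四局", 4)),
  ((8, 0), ("木三局", 3)), ((9, 1), ("木三局", 3)), ((0, 2), ("水二局", 2)), ((1, 3), ("水二局", 2)),
  ((2, 4), ("土五局", 5)), ((3, 5), ("土五局", 5)), ((4, 6), ("火六局", 6)), ((5, 7), ("火六局", 6)),
  ((6, 8), ("木三局", 3)), ((7, 9), ("木三局", 3)), ((8, 10), ("水二局", 2)), ((9, 11), ("水二局", 2))]

-- … and the one-lookup function body: WUXING_JU_TABLE.get((tg, zhi), ('水二局', 2))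
def get_wuxing_ju_alt (gong_tg_idx : Int) (gong_zhi_idx : Int) : String × Int :=
  pvWUXING_JU_TABLE.getD (gong_tg_idx, gong_zhi_idx) ("水二局", 2)

-- ===== PRECONDITION & SPEC =====
def Spec_get_wuxing_ju (gong_tg_idx : Int) (gong_zhi_idx : Int) (out : String × Int) : Prop := out = get_wuxing_ju_alt gong_tg_idx gong_zhi_idx
instance (gong_tg_idx : Int) (gong_zhi_idx : Int) (out : String × Int) : Decidable (Spec_get_wuxing_ju gong_tg_idx gong_zhi_idx out) := by unfold Spec_get_wuxing_ju; infer_instance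

-- ===== CLAIM =====
def Claim_equal_get_wuxing_ju : Prop := ∀ (gong_tg_idx : Int) (gong_zhi_idx : Int), Dom_get_wuxing_ju gong_tg_idx gong_zhi_idx → Spec_get_wuxing_ju gong_tg_idx gong_zhi_idx (get_wuxing_ju gong_tg_idx gong_zhi_idx)

-- ===== LEMMAS AND PROOFS =====

-- out of range: A's scan finds no matching index
lemma findA_none (tg zhi : Int) (h : ¬ (0 ≤ tg ∧ tg < 10 ∧ 0 ≤ zhi ∧ zhi < 12)) :
    (PySem.List.pyRange 0 60 1).find?
      (fun i => PySem.Int.mod i 10 == tg && PySem.Int.mod i 12 == zhi) = none := by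
  apply List.find?_eq_none.mpr
  intro i hi
  rw [PySem.List.mem_pyRange_one] at hi
  intro hc
  rw [PySem.Int.mod_eq_emod_of_pos (by norm_num : (0:Int) < 10),
      PySem.Int.mod_eq_emod_of_pos (by norm_num : (0:Int) < 12)] at hc
  simp only [Bool.and_eq_true, beq_iff_eq] at hc
  omega

-- out of range: every key of B's table is in range, so the lookup misses
-- every key of B's table lies in the sexagenary range
set_option maxRecDepth 65536 in
lemma tableB_keys_range : ∀ k ∈ pvWUXING_JU_TABLE.keys,
    0 ≤ k.1 ∧ k.1 < 10 ∧ 0 ≤ k.2 ∧ k.2 < 12 := by decide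

-- out of range: the lookup misses and returns the default
lemma tableB_miss (tg zhi : Int) (h : ¬ (0 ≤ tg ∧ tg < 10 ∧ 0 ≤ zhi ∧ zhi < 12)) :
    pvWUXING_JU_TABLE.getD (tg, zhi) ("水二局", 2) = ("水二局", 2) := by
  have hnone : pvWUXING_JU_TABLE.get? (tg, zhi) = none := by
    rw [PySem.Dict.get?_eq_none_iff_not_mem_keys]
    intro hk
    have := tableB_keys_range _ hk
    simp only at this
    omega
  simp [PySem.Dict.getD_eq_get?_getD, hnone]

set_option maxRecDepth 16384 in
theorem get_wuxing_ju_spec_aux (tg zhi : Int) :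
    get_wuxing_ju tg zhi = get_wuxing_ju_alt tg zhi := by
  by_cases h : 0 ≤ tg ∧ tg < 10 ∧ 0 ≤ zhi ∧ zhi < 12
  · obtain ⟨h1, h2, h3, h4⟩ := h
    interval_cases tg <;> interval_cases zhi <;> decide
  · rw [get_wuxing_ju_alt, tableB_miss tg zhi h]
    unfold get_wuxing_ju
    rw [findA_none tg zhi h]

-- ===== VERDICT =====
theorem get_wuxing_ju_spec : Claim_equal_get_wuxing_ju := by
  intro tg zhi _
  exact get_wuxing_ju_spec_aux tg zhi
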